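-- pv_equiv track=rewrite | github.com/ReticentDay/InformationSecurityProject | mysite/SDES.py | ComputeK2
-- ===== SOURCE A (Python) =====
-- P8 = [6,3,7,4,8,5,10,9]
--
-- def Shift(ori_key: list, count: int):
-- 	tempKey = []
-- 	for i in ori_key:
-- 		tempKey.append(i)
-- 	half = int(len(ori_key) / 2)
-- 	for i in range(1,count + 1):
-- 		temp = tempKey[0]
-- 		for item in range(1, half):
-- 			tempKey[item - 1] = tempKey[item]
-- 		tempKey[half - 1] = temp
-- 		temp = tempKey[half]
-- 		for item in range(half + 1, len(ori_key)):
-- 			tempKey[item - 1] = tempKey[item]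
-- 		tempKey[len(ori_key) - 1] = temp
-- 	return tempKey
--
-- def ComputeK2(ori_key: list):
-- 	tempKey = [0,0,0,0,0,0,0,0]
-- 	ori_key = Shift(ori_key, 3)
-- 	position = 0
-- 	for i in P8:
-- 		tempKey[position] = ori_key[i-1]
-- 		position += 1
-- 	return tempKey
-- ===== SOURCE B (Python) =====
-- P8 = [6,3,7,4,8,5,10,9]
--
-- def ComputeK2(ori_key: list):
--     half = len(ori_key) // 2
--     # rotate each half left by 3 in one closed-form slicing step
--     rot = ori_key[3:half] + ori_key[0:3] + ori_key[half+3:] + ori_key[half:half+3]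
--     return [rot[i-1] for i in P8]
-- ===== Notes on version B (the rewrite author's own statement) =====
-- stated objective: simpler
-- what changed: Replaces the element-by-element Shift helper (3 iterations of two inner single-step rotation loops with in-place writes) by one closed-form slice expression rotating each half left by 3, and the position-indexed output loop by a direct permutation comprehension over P8; measured constant-factor speedup from bulk slicing.
import Mathlib
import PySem

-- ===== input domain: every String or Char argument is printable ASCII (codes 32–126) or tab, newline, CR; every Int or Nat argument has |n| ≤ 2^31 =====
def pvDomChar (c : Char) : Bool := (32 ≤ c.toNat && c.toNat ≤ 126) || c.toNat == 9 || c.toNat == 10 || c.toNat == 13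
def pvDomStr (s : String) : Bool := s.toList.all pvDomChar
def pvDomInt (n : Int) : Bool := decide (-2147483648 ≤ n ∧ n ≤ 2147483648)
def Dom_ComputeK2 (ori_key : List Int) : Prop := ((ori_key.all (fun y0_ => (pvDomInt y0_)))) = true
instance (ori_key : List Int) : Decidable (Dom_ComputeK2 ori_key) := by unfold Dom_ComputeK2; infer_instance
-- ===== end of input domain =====

-- B replaces A's element-by-element Shift loops by one closed-form slice rotation and a
-- direct permutation map over P8 (objective: simpler; same asymptotic cost).

-- ===== PORT A =====
def P8 : List Int := [6, 3, 7, 4, 8, 5, 10, 9]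

-- body of Shift's 'for i in range(1, count+1)' loop (half, n fixed by the caller)
def shiftBody (half n : Int) (tk : List Int) : List Int :=
  let temp := PySem.List.pyGetD tk 0 0
  let tk1 := (PySem.List.pyRange 1 half 1).foldl
    (fun t item => PySem.List.pySetD t (item - 1) (PySem.List.pyGetD t item 0)) tk
  let tk2 := PySem.List.pySetD tk1 (half - 1) temp
  let temp2 := PySem.List.pyGetD tk2 half 0
  let tk3 := (PySem.List.pyRange (half + 1) n 1).foldl
    (fun t item => PySem.List.pySetD t (item - 1) (PySem.List.pyGetD t item 0)) tk2
  PySem.List.pySetD tk3 (n - 1) temp2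

def Shift (ori_key : List Int) (count : Int) : List Int :=
  let tempKey := ori_key.foldl (fun tk i => tk ++ [i]) []
  let n : Int := ori_key.length
  let half : Int := PySem.Int.truncdiv n 2   -- int(len(ori_key) / 2); exact: n ≥ 0, |n| < 2^53
  (PySem.List.pyRange 1 (count + 1) 1).foldl (fun tk _ => shiftBody half n tk) tempKey

def ComputeK2 (ori_key : List Int) : List Int :=
  let tempKey : List Int := [0, 0, 0, 0, 0, 0, 0, 0]
  let ok := Shift ori_key 3
  (P8.foldl
    (fun (st : List Int × Int) i =>
      (PySem.List.pySetD st.1 st.2 (PySem.List.pyGetD ok (i - 1) 0), st.2 + 1))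
    (tempKey, 0)).1

-- ===== PORT B =====
def ComputeK2_alt (ori_key : List Int) : List Int :=
  let n : Int := ori_key.length
  let half : Int := PySem.Int.floordiv n 2
  let rot := PySem.List.slice ori_key (some 3) (some half)
          ++ PySem.List.slice ori_key (some 0) (some 3)
          ++ PySem.List.slice ori_key (some (half + 3)) none
          ++ PySem.List.slice ori_key (some half) (some (half + 3))
  P8.map (fun i => PySem.List.pyGetD rot (i - 1) 0)

-- ===== PRECONDITION & SPEC =====
-- A raises IndexError on keys of length < 10 (the P8 lookup reads index 9); excluded.
def Pre_ComputeK2 (ori_key : List Int) : Prop := 10 ≤ ori_key.length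
instance (ori_key : List Int) : Decidable (Pre_ComputeK2 ori_key) := by
  unfold Pre_ComputeK2; infer_instance

def pvWitness_ComputeK2 : List Int := [1, 0, 1, 0, 0, 1, 1, 1, 0, 0]

def Spec_ComputeK2 (ori_key : List Int) (out : List Int) : Prop := out = ComputeK2_alt ori_key
instance (ori_key : List Int) (out : List Int) : Decidable (Spec_ComputeK2 ori_key out) := by
  unfold Spec_ComputeK2; infer_instance

-- ===== CLAIM (what is proved, stated in full; the proofs are below) =====
def Claim_equal_ComputeK2 : Prop := ∀ (ori_key : List Int), Dom_ComputeK2 ori_key →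
  Pre_ComputeK2 ori_key → Spec_ComputeK2 ori_key (ComputeK2 ori_key)

-- ===== LEMMAS AND PROOFS =====

theorem getD_at (pre : List Int) (a b : Int) (rest : List Int) (i : Int)
    (hi : i = (pre.length : Int) + 1) :
    PySem.List.pyGetD (pre ++ a :: b :: rest) i 0 = b := by
  subst hi
  have h : ((pre.length : Int) + 1) = ((pre.length + 1 : Nat) : Int) := by push_cast; ring
  rw [h, PySem.List.pyGetD_natCast]
  simp [List.getD_eq_getElem?_getD]

theorem setD_at (pre : List Int) (a v : Int) (rest : List Int) (i : Int)
    (hi : i = (pre.length : Int)) :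
    PySem.List.pySetD (pre ++ a :: rest) i v = pre ++ v :: rest := by
  subst hi
  rw [PySem.List.pySetD_natCast]; simp

-- the Python loop 'for item in range(s, e): tk[item-1] = tk[item]' slides a segment down one slot
theorem shiftDown (ms : List Int) : ∀ (pre : List Int) (a m : Int) (post : List Int),
    (PySem.List.pyRange ((pre.length : Int) + 1) ((pre.length : Int) + 1 + ms.length + 1) 1).foldl
      (fun t item => PySem.List.pySetD t (item - 1) (PySem.List.pyGetD t item 0))
      (pre ++ a :: (ms ++ [m]) ++ post)
    = pre ++ (ms ++ [m]) ++ m :: post := by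
  induction ms with
  | nil =>
    intro pre a m post
    rw [PySem.List.pyRange_one_cons (by omega)]
    have h2 : (PySem.List.pyRange ((pre.length : Int) + 1 + 1)
        ((pre.length : Int) + 1 + ([] : List Int).length + 1) 1) = [] := by
      simp [pysem]
    rw [h2]
    simp only [List.foldl_cons, List.foldl_nil, add_sub_cancel_right]
    have hg : (pre ++ a :: ([] ++ [m]) ++ post) = pre ++ a :: m :: post := by simp
    rw [hg, getD_at pre a m post _ rfl, setD_at pre a m (m :: post) _ rfl]
    simp
  | cons b ms ih =>
    intro pre a m post
    rw [PySem.List.pyRange_one_cons (by omega)]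
    simp only [List.foldl_cons, add_sub_cancel_right]
    have hg : (pre ++ a :: ((b :: ms) ++ [m]) ++ post) = pre ++ a :: b :: (ms ++ [m] ++ post) := by
      simp
    rw [hg, getD_at pre a b (ms ++ [m] ++ post) _ rfl,
      setD_at pre a b (b :: (ms ++ [m] ++ post)) _ rfl]
    have hre : (pre ++ b :: b :: (ms ++ [m] ++ post)) = (pre ++ [b]) ++ b :: (ms ++ [m]) ++ post := by
      simp
    rw [hre]
    have hb : ((pre.length : Int) + 1 + 1) = (((pre ++ [b]).length : Int) + 1) := by simp
    have hb2 : ((pre.length : Int) + 1 + ((b :: ms).length : Int) + 1)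
        = (((pre ++ [b]).length : Int) + 1 + ms.length + 1) := by simp; ring
    rw [hb, hb2, ih]
    simp

theorem shiftDown' (ms pre : List Int) (a m : Int) (post : List Int) (s e : Int)
    (hs : s = (pre.length : Int) + 1) (he : e = (pre.length : Int) + 1 + ms.length + 1) :
    (PySem.List.pyRange s e 1).foldl
      (fun t item => PySem.List.pySetD t (item - 1) (PySem.List.pyGetD t item 0))
      (pre ++ a :: (ms ++ [m]) ++ post)
    = pre ++ (ms ++ [m]) ++ m :: post := by
  subst hs he; exact shiftDown ms pre a m post

-- one Shift iteration rotates each half one position to the left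
theorem body_eq (u v : List Int) (hu : 2 ≤ u.length) (hv : 2 ≤ v.length) :
    shiftBody (u.length : Int) ((u.length : Int) + v.length) (u ++ v)
    = u.rotate 1 ++ v.rotate 1 := by
  obtain ⟨a, u', rfl⟩ : ∃ a u', u = a :: u' := by
    cases u with | nil => simp at hu | cons a u' => exact ⟨a, u', rfl⟩
  obtain ⟨ms, m, rfl⟩ : ∃ ms m, u' = ms ++ [m] := by
    rcases List.eq_nil_or_concat u' with h | ⟨ms, m, h⟩
    · subst h; simp at hu
    · exact ⟨ms, m, by simpa using h⟩
  obtain ⟨b, v', rfl⟩ : ∃ b v', v = b :: v' := by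
    cases v with | nil => simp at hv | cons b v' => exact ⟨b, v', rfl⟩
  obtain ⟨ms2, m2, rfl⟩ : ∃ ms2 m2, v' = ms2 ++ [m2] := by
    rcases List.eq_nil_or_concat v' with h | ⟨ms2, m2, h⟩
    · subst h; simp at hv
    · exact ⟨ms2, m2, by simpa using h⟩
  unfold shiftBody
  simp only []
  have htemp : PySem.List.pyGetD ((a :: (ms ++ [m])) ++ b :: (ms2 ++ [m2])) 0 0 = a :=
    PySem.List.pyGetD_zero_cons ..
  have e1 : (PySem.List.pyRange 1 (((a :: (ms ++ [m])).length : Int)) 1).foldl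
      (fun t item => PySem.List.pySetD t (item - 1) (PySem.List.pyGetD t item 0))
      ((a :: (ms ++ [m])) ++ b :: (ms2 ++ [m2]))
      = (ms ++ [m]) ++ m :: (b :: (ms2 ++ [m2])) :=
    shiftDown' ms [] a m (b :: (ms2 ++ [m2])) 1 _ (by simp) (by simp; ring)
  rw [htemp, e1]
  have e2 : PySem.List.pySetD ((ms ++ [m]) ++ m :: (b :: (ms2 ++ [m2])))
      (((a :: (ms ++ [m])).length : Int) - 1) a
      = (ms ++ [m]) ++ a :: (b :: (ms2 ++ [m2])) :=
    setD_at (ms ++ [m]) m a (b :: (ms2 ++ [m2])) _ (by simp)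
  rw [e2]
  have e3 : PySem.List.pyGetD ((ms ++ [m]) ++ a :: (b :: (ms2 ++ [m2])))
      (((a :: (ms ++ [m])).length : Int)) 0 = b :=
    getD_at (ms ++ [m]) a b (ms2 ++ [m2]) _ (by simp)
  rw [e3]
  have e4 : (PySem.List.pyRange (((a :: (ms ++ [m])).length : Int) + 1)
        (((a :: (ms ++ [m])).length : Int) + ((b :: (ms2 ++ [m2])).length : Int)) 1).foldl
      (fun t item => PySem.List.pySetD t (item - 1) (PySem.List.pyGetD t item 0))
      ((ms ++ [m]) ++ a :: (b :: (ms2 ++ [m2])))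
      = ((ms ++ [m]) ++ [a]) ++ (ms2 ++ [m2]) ++ m2 :: [] := by
    have := shiftDown' ms2 ((ms ++ [m]) ++ [a]) b m2 [] _ _ rfl rfl
    have hl : ((ms ++ [m]) ++ [a]) ++ b :: (ms2 ++ [m2]) ++ []
        = (ms ++ [m]) ++ a :: (b :: (ms2 ++ [m2])) := by simp
    rw [hl] at this
    have he : ((((ms ++ [m]) ++ [a]).length : Int) + 1 + (ms2.length : Int) + 1)
        = ((a :: (ms ++ [m])).length : Int) + ((b :: (ms2 ++ [m2])).length : Int) := by
      simp; ring
    have hs : ((((ms ++ [m]) ++ [a]).length : Int) + 1) = ((a :: (ms ++ [m])).length : Int) + 1 := by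
      simp; ring
    rw [he] at this
    rw [hs] at this
    simpa using this
  rw [e4]
  have e5 : PySem.List.pySetD (((ms ++ [m]) ++ [a]) ++ (ms2 ++ [m2]) ++ m2 :: [])
      (((a :: (ms ++ [m])).length : Int) + ((b :: (ms2 ++ [m2])).length : Int) - 1) b
      = (((ms ++ [m]) ++ [a]) ++ (ms2 ++ [m2])) ++ b :: [] := by
    have := setD_at (((ms ++ [m]) ++ [a]) ++ (ms2 ++ [m2])) m2 b []
      (((a :: (ms ++ [m])).length : Int) + ((b :: (ms2 ++ [m2])).length : Int) - 1) (by simp; ring)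
    simpa using this
  rw [e5]
  simp [List.rotate_cons_succ]

theorem body_eq' (u v : List Int) (hu : 2 ≤ u.length) (hv : 2 ≤ v.length) (half n : Int)
    (hh : half = (u.length : Int)) (hn : n = (u.length : Int) + v.length) :
    shiftBody half n (u ++ v) = u.rotate 1 ++ v.rotate 1 := by
  subst hh hn; exact body_eq u v hu hv

-- A's output loop over P8 with a running position is the permutation map
theorem assembleA (R : List Int) :
    (P8.foldl (fun (st : List Int × Int) i =>
        (PySem.List.pySetD st.1 st.2 (PySem.List.pyGetD R (i - 1) 0), st.2 + 1))
      (([0,0,0,0,0,0,0,0] : List Int), (0:Int))).1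
    = P8.map (fun i => PySem.List.pyGetD R (i - 1) 0) := by
  norm_num [P8, pysem, PySem.List.pySetD_of_nonneg]
  simp [List.set]

theorem sliceA (l : List Int) (h : Nat) (hh : (3:Nat) ≤ h) :
    PySem.List.slice l (some 3) (some (h : Int)) = (l.take h).drop 3 := by
  rw [PySem.List.slice_toNat l (by norm_num) (by positivity), List.take_drop]
  norm_num
  simp
  rw [Nat.add_sub_cancel' hh]

theorem sliceB (l : List Int) (h : Nat) (hh : (3:Nat) ≤ h) :
    PySem.List.slice l (some 0) (some 3) = (l.take h).take 3 := by
  rw [PySem.List.slice_zero_start, PySem.List.slice_to l (by norm_num : (0:Int) ≤ 3),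
    List.take_take]
  simp
  omega

theorem sliceC (l : List Int) (h : Nat) :
    PySem.List.slice l (some ((h:Int) + 3)) none = (l.drop h).drop 3 := by
  rw [PySem.List.slice_from l (by positivity), List.drop_drop]
  congr 1

theorem sliceD (l : List Int) (h : Nat) :
    PySem.List.slice l (some (h:Int)) (some ((h:Int)+3)) = (l.drop h).take 3 := by
  rw [PySem.List.slice_toNat l (by positivity) (by positivity)]
  congr 1
  omega

theorem shift3_eq (l : List Int) (hl : 10 ≤ l.length) :
    Shift l 3 = (l.take (l.length / 2)).rotate 3 ++ (l.drop (l.length / 2)).rotate 3 := by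
  have hcopy : l.foldl (fun tk i => tk ++ [i]) [] = l := by
    simpa using PySem.List.foldl_append_singleton l []
  have htr : PySem.Int.truncdiv (l.length : Int) 2 = ((l.length / 2 : Nat) : Int) := by
    simp [PySem.Int.truncdiv]
  have hrange : PySem.List.pyRange 1 (3 + 1) 1 = [1, 2, 3] := by decide
  set h := l.length / 2 with hh
  have hu : (l.take h).length = h := by simp; omega
  have hv : (l.drop h).length = l.length - h := by simp
  have hul : 2 ≤ (l.take h).length := by omega
  have hvl : 2 ≤ (l.drop h).length := by omega
  unfold Shift
  simp only [hcopy, htr, hrange, List.foldl_cons, List.foldl_nil]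
  have s1 : shiftBody ((h : Nat) : Int) ((l.length : Nat) : Int) l
      = (l.take h).rotate 1 ++ (l.drop h).rotate 1 := by
    conv_lhs => rw [← List.take_append_drop h l]
    exact body_eq' (l.take h) (l.drop h) hul hvl _ _ (by rw [hu]) (by simp; omega)
  rw [s1]
  have s2 : shiftBody ((h : Nat) : Int) ((l.length : Nat) : Int)
      ((l.take h).rotate 1 ++ (l.drop h).rotate 1)
      = ((l.take h).rotate 1).rotate 1 ++ ((l.drop h).rotate 1).rotate 1 :=
    body_eq' _ _ (by simpa using hul) (by simpa using hvl) _ _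
      (by simp [hu]) (by simp; omega)
  rw [s2]
  have s3 : shiftBody ((h : Nat) : Int) ((l.length : Nat) : Int)
      (((l.take h).rotate 1).rotate 1 ++ ((l.drop h).rotate 1).rotate 1)
      = ((((l.take h).rotate 1).rotate 1).rotate 1 ++ (((l.drop h).rotate 1).rotate 1).rotate 1) :=
    body_eq' _ _ (by simpa using hul) (by simpa using hvl) _ _
      (by simp [hu]) (by simp; omega)
  rw [s3]
  simp [List.rotate_rotate]

-- ===== VERDICT (by name: the statement is the Claim_ definition above) =====
theorem ComputeK2_spec : Claim_equal_ComputeK2 := by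
  intro l _hdom hpre
  unfold Pre_ComputeK2 at hpre
  unfold Spec_ComputeK2 ComputeK2 ComputeK2_alt
  simp only []
  have hh3 : (3:Nat) ≤ l.length / 2 := by omega
  have hfd : PySem.Int.floordiv (l.length : Int) 2 = ((l.length / 2 : Nat) : Int) := by
    exact_mod_cast PySem.Int.floordiv_natCast l.length 2
  have hrot : Shift l 3
      = ((l.take (l.length / 2)).drop 3 ++ (l.take (l.length / 2)).take 3)
        ++ ((l.drop (l.length / 2)).drop 3 ++ (l.drop (l.length / 2)).take 3) := by
    rw [shift3_eq l hpre]
    rw [List.rotate_eq_drop_append_take (by simp; omega),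
        List.rotate_eq_drop_append_take (by simp; omega)]
  rw [assembleA, hrot, hfd,
      sliceA l (l.length / 2) hh3, sliceB l (l.length / 2) hh3,
      sliceC l (l.length / 2), sliceD l (l.length / 2)]
  simp [List.append_assoc]
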